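-- pv_equiv track=rewrite | github.com/gavishap/Digital-Ink-AI-Intake-Automation-Backend | report_learning/correlator/trim_extractions.py | detect_form_start
-- ===== SOURCE A (Python) =====
-- MEDICAL_KEYWORDS = frozenset({
--     "pain", "injury", "smoke", "alcohol", "medication", "vas",
--     "halitosis", "diabetes", "blood_pressure", "thyroid",
--     "hand_dominance", "breathing", "kidney", "headache", "allergy",
--     "heart", "sleep", "before_", "after_", "presently_", "swallowing",
--     "hoarseness", "saliva", "dry_mouth", "apnea", "cpap",
--     "toothbrush", "floss", "bruxism", "numbness",
-- })
--
-- LAWYER_KEYWORDS = frozenset({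
--     "employer_address", "header_date", "header_page", "signature_title",
--     "claim_no", "wcab", "adjuster", "attorney", "carrier",
-- })
--
-- def _keys_lower(field_values: dict) -> set[str]:
--     return {k.lower().strip() for k in field_values}
--
-- def _has_name_field(keys: set[str]) -> bool:
--     return any("name" in k for k in keys)
--
-- def _has_nurse_field(keys: set[str]) -> bool:
--     return any("nurse" in k for k in keys)
--
-- def _has_demographics(keys: set[str]) -> bool:
--     has_date = any(k in ("date", "p1_date") or k == "date" for k in keys)
--     has_birth = any("birth" in k for k in keys)
--     return has_date and has_birth
--
-- def _medical_score(keys: set[str]) -> int: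
--     score = 0
--     for k in keys:
--         if any(med in k for med in MEDICAL_KEYWORDS):
--             score += 1
--     return score
--
-- def _is_lawyer_page(keys: set[str]) -> bool:
--     if not keys:
--         return True
--     return any(any(lk in k for lk in LAWYER_KEYWORDS) for k in keys)
--
-- def detect_form_start(pages: list[dict]) -> int:
--     """Return the 0-based index of the first real examination page."""
--     for idx, page in enumerate(pages):
--         keys = _keys_lower(page.get("field_values", {}))
--         if _has_name_field(keys) and _has_nurse_field(keys):
--             return idx
--
--     for idx, page in enumerate(pages):
--         keys = _keys_lower(page.get("field_values", {}))
--         if _has_name_field(keys) and _has_demographics(keys):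
--             return idx
--
--     for idx, page in enumerate(pages):
--         keys = _keys_lower(page.get("field_values", {}))
--         if _is_lawyer_page(keys):
--             continue
--         if _medical_score(keys) >= 3:
--             return idx
--
--     return 0
-- ===== SOURCE B (Python) =====
-- MEDICAL_KEYWORDS = frozenset({
--     "pain", "injury", "smoke", "alcohol", "medication", "vas",
--     "halitosis", "diabetes", "blood_pressure", "thyroid",
--     "hand_dominance", "breathing", "kidney", "headache", "allergy",
--     "heart", "sleep", "before_", "after_", "presently_", "swallowing",
--     "hoarseness", "saliva", "dry_mouth", "apnea", "cpap",
--     "toothbrush", "floss", "bruxism", "numbness",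
-- })
--
-- LAWYER_KEYWORDS = frozenset({
--     "employer_address", "header_date", "header_page", "signature_title",
--     "claim_no", "wcab", "adjuster", "attorney", "carrier",
-- })
--
-- def _keys_lower(field_values: dict) -> set[str]:
--     return {k.lower().strip() for k in field_values}
--
-- def _has_name_field(keys: set[str]) -> bool:
--     return any("name" in k for k in keys)
--
-- def _has_nurse_field(keys: set[str]) -> bool:
--     return any("nurse" in k for k in keys)
--
-- def _has_demographics(keys: set[str]) -> bool:
--     has_date = any(k in ("date", "p1_date") or k == "date" for k in keys)
--     has_birth = any("birth" in k for k in keys)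
--     return has_date and has_birth
--
-- def _medical_score(keys: set[str]) -> int:
--     score = 0
--     for k in keys:
--         if any(med in k for med in MEDICAL_KEYWORDS):
--             score += 1
--     return score
--
-- def _is_lawyer_page(keys: set[str]) -> bool:
--     if not keys:
--         return True
--     return any(any(lk in k for lk in LAWYER_KEYWORDS) for k in keys)
--
-- def detect_form_start(pages: list[dict]) -> int:
--     """Return the 0-based index of the first real examination page (single pass)."""
--     first_nurse = first_demo = first_medical = None
--     for idx, page in enumerate(pages):
--         keys = _keys_lower(page.get("field_values", {}))
--         if first_nurse is None and _has_name_field(keys) and _has_nurse_field(keys):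
--             first_nurse = idx
--         if first_demo is None and _has_name_field(keys) and _has_demographics(keys):
--             first_demo = idx
--         if first_medical is None and not _is_lawyer_page(keys) and _medical_score(keys) >= 3:
--             first_medical = idx
--     if first_nurse is not None:
--         return first_nurse
--     if first_demo is not None:
--         return first_demo
--     if first_medical is not None:
--         return first_medical
--     return 0
-- ===== Notes on version B (the rewrite author's own statement) =====
-- stated objective: alternative
-- what changed: A's three successive full scans of pages (one per priority tier) are replaced by a single pass over enumerate(pages) that records the first index matching each tier, resolved in tier order after the loop; keys are computed once per page instead of up to three times.
import Mathlib
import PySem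

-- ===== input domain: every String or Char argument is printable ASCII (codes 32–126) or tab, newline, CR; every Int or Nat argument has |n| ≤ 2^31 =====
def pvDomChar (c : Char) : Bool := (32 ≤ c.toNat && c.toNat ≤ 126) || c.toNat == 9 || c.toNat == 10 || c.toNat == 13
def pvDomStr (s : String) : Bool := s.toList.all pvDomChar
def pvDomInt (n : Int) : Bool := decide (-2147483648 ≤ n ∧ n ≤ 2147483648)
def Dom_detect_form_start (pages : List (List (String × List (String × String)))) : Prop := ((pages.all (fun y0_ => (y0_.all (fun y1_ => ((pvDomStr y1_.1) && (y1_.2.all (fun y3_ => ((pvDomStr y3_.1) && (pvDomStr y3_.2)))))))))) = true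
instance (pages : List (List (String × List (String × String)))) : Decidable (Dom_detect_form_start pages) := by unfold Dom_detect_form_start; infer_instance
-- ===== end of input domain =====

-- B replaces A's three full scans over pages by one pass that records the first index per tier; same predicates, same return value (objective: alternative/simpler traversal).

-- shared helpers (the same helper functions appear verbatim in both Pythons)
def medicalKeywords : List String :=
  ["pain", "injury", "smoke", "alcohol", "medication", "vas",
   "halitosis", "diabetes", "blood_pressure", "thyroid",
   "hand_dominance", "breathing", "kidney", "headache", "allergy",
   "heart", "sleep", "before_", "after_", "presently_", "swallowing",
   "hoarseness", "saliva", "dry_mouth", "apnea", "cpap",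
   "toothbrush", "floss", "bruxism", "numbness"]

def lawyerKeywords : List String :=
  ["employer_address", "header_date", "header_page", "signature_title",
   "claim_no", "wcab", "adjuster", "attorney", "carrier"]

-- {k.lower().strip() for k in field_values}
def keysLower (fv : List (String × String)) : PySem.Set String :=
  PySem.Set.ofList (fv.map (fun kv => PySem.Str.strip (PySem.Str.lower kv.1)))

def hasNameField (keys : PySem.Set String) : Bool :=
  keys.any (fun k => PySem.Str.isIn "name" k)

def hasNurseField (keys : PySem.Set String) : Bool :=
  keys.any (fun k => PySem.Str.isIn "nurse" k)

def hasDemographics (keys : PySem.Set String) : Bool :=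
  (keys.any (fun k => ((k == "date" || k == "p1_date") || k == "date"))) &&
  (keys.any (fun k => PySem.Str.isIn "birth" k))

def medicalScore (keys : PySem.Set String) : Int :=
  keys.foldl (fun score k =>
    if medicalKeywords.any (fun med => PySem.Str.isIn med k) then score + 1 else score) 0

def isLawyerPage (keys : PySem.Set String) : Bool :=
  if keys.isEmpty then true
  else keys.any (fun k => lawyerKeywords.any (fun lk => PySem.Str.isIn lk k))


-- ===== PORT A =====
-- A: three successive scans (tier 1: name+nurse, tier 2: name+demographics, tier 3: non-lawyer medical), else 0
def loop1 : List (List (String × List (String × String))) → Int → Option Int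
  | [], _ => none
  | page :: rest, idx =>
    let keys := keysLower (PySem.Dict.getD (PySem.Dict.ofList page) "field_values" [])
    if hasNameField keys && hasNurseField keys then some idx else loop1 rest (idx + 1)

def loop2 : List (List (String × List (String × String))) → Int → Option Int
  | [], _ => none
  | page :: rest, idx =>
    let keys := keysLower (PySem.Dict.getD (PySem.Dict.ofList page) "field_values" [])
    if hasNameField keys && hasDemographics keys then some idx else loop2 rest (idx + 1)

def loop3 : List (List (String × List (String × String))) → Int → Option Int
  | [], _ => none
  | page :: rest, idx =>
    let keys := keysLower (PySem.Dict.getD (PySem.Dict.ofList page) "field_values" [])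
    if isLawyerPage keys then loop3 rest (idx + 1)
    else if decide (3 ≤ medicalScore keys) then some idx else loop3 rest (idx + 1)

def detect_form_start (pages : List (List (String × List (String × String)))) : Int :=
  match loop1 pages 0 with
  | some i => i
  | none =>
    match loop2 pages 0 with
    | some i => i
    | none =>
      match loop3 pages 0 with
      | some i => i
      | none => 0

-- ===== PORT B =====
-- one pass over enumerate(pages), recording the first index of each tier, then tier-priority resolution
def altStep (st : Option Int × Option Int × Option Int)
    (ip : Int × List (String × List (String × String))) :
    Option Int × Option Int × Option Int :=
  let keys := keysLower (PySem.Dict.getD (PySem.Dict.ofList ip.2) "field_values" [])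
  let fn := if st.1.isNone && (hasNameField keys && hasNurseField keys) then some ip.1 else st.1
  let fd := if st.2.1.isNone && (hasNameField keys && hasDemographics keys) then some ip.1 else st.2.1
  let fm := if st.2.2.isNone && (!isLawyerPage keys && decide (3 ≤ medicalScore keys)) then some ip.1 else st.2.2
  (fn, fd, fm)

def detect_form_start_alt (pages : List (List (String × List (String × String)))) : Int :=
  let st := (PySem.List.enumerate pages).foldl altStep (none, none, none)
  match st.1 with
  | some i => i
  | none =>
    match st.2.1 with
    | some i => i
    | none =>
      match st.2.2 with
      | some i => i
      | none => 0

-- ===== PRECONDITION & SPEC =====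
def Spec_detect_form_start (pages : List (List (String × List (String × String)))) (out : Int) : Prop := out = detect_form_start_alt pages
instance (pages : List (List (String × List (String × String)))) (out : Int) : Decidable (Spec_detect_form_start pages out) := by unfold Spec_detect_form_start; infer_instance

-- ===== CLAIM (what is proved, stated in full; the proofs are below) =====
def Claim_equal_detect_form_start : Prop := ∀ (pages : List (List (String × List (String × String)))), Dom_detect_form_start pages → Spec_detect_form_start pages (detect_form_start pages)

-- ===== LEMMAS AND PROOFS =====

-- a guarded first-occurrence update folded through orElse: one step of B equals one step of A's loop
theorem orElse_step (o r : Option Int) (c : Bool) (s : Int) :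
    (Option.orElse (if o.isNone && c then some s else o) (fun _ => r)) =
    Option.orElse o (fun _ => if c then some s else r) := by
  cases o <;> cases c <;> rfl

-- the single fold computes, per component, exactly A's three loops (first index per tier)
theorem fold_eq (pages : List (List (String × List (String × String)))) (s : Int)
    (a b c : Option Int) :
    (PySem.List.enumerate pages s).foldl altStep (a, b, c) =
      (a.orElse (fun _ => loop1 pages s),
       b.orElse (fun _ => loop2 pages s),
       c.orElse (fun _ => loop3 pages s)) := by
  induction pages generalizing s a b c with
  | nil => simp [PySem.List.enumerate_nil, loop1, loop2, loop3]
  | cons page rest ih =>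
    rw [PySem.List.enumerate_cons, List.foldl_cons]
    simp only [altStep]
    rw [ih]
    rw [orElse_step, orElse_step, orElse_step]
    simp only [loop1, loop2, loop3]
    cases isLawyerPage (keysLower (PySem.Dict.getD (PySem.Dict.ofList page) "field_values" [])) <;>
      simp

theorem detect_form_start_spec : Claim_equal_detect_form_start := by
  intro pages _
  show detect_form_start pages = detect_form_start_alt pages
  unfold detect_form_start detect_form_start_alt
  rw [show PySem.List.enumerate pages = PySem.List.enumerate pages 0 from rfl, fold_eq]
  cases loop1 pages 0 <;> cases loop2 pages 0 <;> cases loop3 pages 0 <;> rfl
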